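-- pv_equiv track=rewrite | github.com/coadywing/line_breaker | semantic_linebreak.py | strip_trailing_comment
-- ===== SOURCE A (Python) =====
-- def strip_trailing_comment(line):
--     """Strip trailing LaTeX comment, return (prose, comment_suffix).
--
--     The comment_suffix includes the leading whitespace and %.
--     Returns ('line', '') if no comment found.
--     """
--     # Find unescaped %
--     i = 0
--     while i < len(line):
--         if line[i] == '\\':
--             i += 2
--             continue
--         if line[i] == '%':
--             return line[:i].rstrip(), line[i:]
--         i += 1
--     return line, ''
-- ===== SOURCE B (Python) =====
-- def strip_trailing_comment(line):
--     """Strip trailing LaTeX comment, return (prose, comment_suffix).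
--
--     Two-stage approach: split the line on backslashes, then search each
--     piece for '%' with str.find, skipping a piece's first character when
--     the preceding backslash escapes it (a one-bit carry across pieces).
--     """
--     pos = 0
--     consume = 0  # chars at the start of the current piece eaten by an escape
--     for piece in line.split('\\'):
--         j = piece.find('%', consume)
--         if j != -1:
--             return line[:pos + j].rstrip(), line[pos + j:]
--         pos += len(piece) + 1
--         # the separating backslash escapes the next piece's first char,
--         # unless it was itself the escaped char (empty piece under escape)
--         consume = 0 if (piece == '' and consume == 1) else 1
--     return line, ''
-- ===== Notes on version B (the rewrite author's own statement) =====
-- stated objective: faster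
-- what changed: Replaced the per-character index-advancing scan by a two-stage method: split the line on backslashes, then locate the comment sign in each piece with str.find, carrying a one-bit escape state across pieces (the per-char work moves into C-level split/find).
import Mathlib
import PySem

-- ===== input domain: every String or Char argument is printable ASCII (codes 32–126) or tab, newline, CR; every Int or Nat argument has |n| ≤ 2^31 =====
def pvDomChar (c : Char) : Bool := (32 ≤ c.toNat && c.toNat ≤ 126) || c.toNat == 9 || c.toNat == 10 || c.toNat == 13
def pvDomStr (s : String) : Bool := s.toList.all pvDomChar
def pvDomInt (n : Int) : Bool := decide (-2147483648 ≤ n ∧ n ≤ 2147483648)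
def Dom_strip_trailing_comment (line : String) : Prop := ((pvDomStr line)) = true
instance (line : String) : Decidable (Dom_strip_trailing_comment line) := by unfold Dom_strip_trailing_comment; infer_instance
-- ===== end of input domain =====

-- B replaces A's per-character scan by split-on-backslash + per-piece substring find (timed faster by a constant factor).

-- ===== PORT A =====
-- the while-loop of A: `cs` is the remainder line[i:], i the current index;
-- `i += 2` after a backslash drops the backslash and (if present) the next char.
-- line[:i] is `take i`, line[i:] is `drop i` (i : Nat, so exactly Python's slices here).
def stcGoA (line : String) (cs : List Char) (i : Nat) : String × String :=
  match cs with
  | [] => (line, "")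
  | c :: rest =>
    if c = '\\' then stcGoA line (rest.drop 1) (i + 2)
    else if c = '%' then
      (String.ofList (PySem.Chars.rstrip (line.toList.take i)),
       String.ofList (line.toList.drop i))
    else stcGoA line rest (i + 1)
termination_by cs.length
decreasing_by all_goals (simp only [List.length_cons, List.length_drop]; omega)

def strip_trailing_comment (line : String) : String × String :=
  stcGoA line line.toList 0

-- ===== PORT B =====
-- line.split('\\') over List Char (always returns at least one piece)
def stcSplit : List Char → List (List Char)
  | [] => [[]]
  | c :: rest =>
    match stcSplit rest with
    | [] => [[]]  -- unreachable: stcSplit never returns []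
    | p :: ps => if c = '\\' then [] :: p :: ps else (c :: p) :: ps

-- piece.find('%', start): absolute index of first '%' at position ≥ start
-- (argument is piece.drop start, j starts at start)
def stcFindPct : List Char → Nat → Option Nat
  | [], _ => none
  | c :: rest, j => if c = '%' then some j else stcFindPct rest (j + 1)

-- the for-loop of Source B: pieces, running position, escape-consume bit
def stcLoop : List (List Char) → Nat → Nat → Option Nat
  | [], _, _ => none
  | p :: ps, pos, consume =>
    match stcFindPct (p.drop consume) consume with
    | some j => some (pos + j)
    | none => stcLoop ps (pos + p.length + 1) (if p = [] ∧ consume = 1 then 0 else 1)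

def strip_trailing_comment_alt (line : String) : String × String :=
  match stcLoop (stcSplit line.toList) 0 0 with
  | some i =>
      (String.ofList (PySem.Chars.rstrip (line.toList.take i)),
       String.ofList (line.toList.drop i))
  | none => (line, "")

-- ===== PRECONDITION & SPEC =====
def Spec_strip_trailing_comment (line : String) (out : String × String) : Prop := out = strip_trailing_comment_alt line
instance (line : String) (out : String × String) : Decidable (Spec_strip_trailing_comment line out) := by unfold Spec_strip_trailing_comment; infer_instance

-- ===== CLAIM =====
def Claim_equal_strip_trailing_comment : Prop := ∀ (line : String), Dom_strip_trailing_comment line → Spec_strip_trailing_comment line (strip_trailing_comment line)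

-- ===== LEMMAS AND PROOFS =====

-- option-valued mirror of A's scan: index of the first unescaped '%'
def scanOpt : List Char → Nat → Option Nat
  | [], _ => none
  | c :: rest, i =>
    if c = '\\' then scanOpt (rest.drop 1) (i + 2)
    else if c = '%' then some i
    else scanOpt rest (i + 1)
termination_by cs _ => cs.length
decreasing_by all_goals (simp only [List.length_cons, List.length_drop]; omega)

theorem stcGoA_eq_scanOpt (line : String) :
    ∀ n (cs : List Char), cs.length ≤ n → ∀ i,
      stcGoA line cs i =
        (match scanOpt cs i with
         | some k =>
             (String.ofList (PySem.Chars.rstrip (line.toList.take k)),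
              String.ofList (line.toList.drop k))
         | none => (line, "")) := by
  intro n
  induction n with
  | zero =>
    intro cs h i
    have : cs = [] := List.length_eq_zero_iff.mp (Nat.le_zero.mp h)
    subst this; simp [stcGoA, scanOpt]
  | succ n ih =>
    intro cs h i
    match cs with
    | [] => simp [stcGoA, scanOpt]
    | c :: rest =>
      by_cases hb : c = '\\'
      · subst hb
        rw [show stcGoA line ('\\' :: rest) i = stcGoA line (rest.drop 1) (i + 2) from by
              simp [stcGoA]]
        rw [show scanOpt ('\\' :: rest) i = scanOpt (rest.drop 1) (i + 2) from by
              simp [scanOpt]]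
        exact ih (rest.drop 1) (by simp at h ⊢; omega) (i + 2)
      · by_cases hp : c = '%'
        · subst hp; simp [stcGoA, scanOpt, hb]
        · rw [show stcGoA line (c :: rest) i = stcGoA line rest (i + 1) from by
                simp [stcGoA, hb, hp]]
          rw [show scanOpt (c :: rest) i = scanOpt rest (i + 1) from by
                simp [scanOpt, hb, hp]]
          exact ih rest (by simp at h; omega) (i + 1)

theorem stcFindPct_shift : ∀ (p : List Char) (j : Nat),
    stcFindPct p (j + 1) = (stcFindPct p j).map (· + 1) := by
  intro p
  induction p with
  | nil => intro j; simp [stcFindPct]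
  | cons c rest ih =>
    intro j
    by_cases hp : c = '%' <;> simp [stcFindPct, hp, ih]

theorem stcSplit_ne_nil (cs : List Char) : stcSplit cs ≠ [] := by
  cases cs with
  | nil => simp [stcSplit]
  | cons c rest =>
    simp only [stcSplit]
    rcases stcSplit rest with _ | ⟨p, ps⟩
    · simp
    · dsimp only
      split <;> simp

theorem stcSplit_bs (rest : List Char) : stcSplit ('\\' :: rest) = [] :: stcSplit rest := by
  simp only [stcSplit]
  rcases h : stcSplit rest with _ | ⟨p, ps⟩
  · exact absurd h (stcSplit_ne_nil rest)
  · simp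

theorem stcSplit_cons_ne (c : Char) (hc : ¬ c = '\\') (rest p : List Char)
    (ps : List (List Char)) (h : stcSplit rest = p :: ps) :
    stcSplit (c :: rest) = (c :: p) :: ps := by
  simp only [stcSplit]
  rw [h]; simp only [hc, if_false]

-- stepping the loop past an unescaped leading char
theorem stcLoop_step (c : Char) (hp : ¬ c = '%') (p : List Char) (ps : List (List Char)) (i : Nat) :
    stcLoop ((c :: p) :: ps) i 0 = stcLoop (p :: ps) (i + 1) 0 := by
  simp only [stcLoop, List.drop_zero]
  rw [show stcFindPct (c :: p) 0 = stcFindPct p 1 from by simp [stcFindPct, hp]]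
  rw [show (1 : Nat) = 0 + 1 from rfl, stcFindPct_shift]
  rcases hf : stcFindPct p 0 with _ | j
  · simp only [Option.map_none]
    simp only [List.length_cons, reduceCtorEq, if_false, Nat.zero_ne_add_one, and_false]
    congr 1
    omega
  · simp only [Option.map_some]
    congr 1
    omega

-- stepping the loop past the escaped first char of a piece
theorem stcLoop_step_esc (d : Char) (p : List Char) (ps : List (List Char)) (i : Nat) :
    stcLoop ((d :: p) :: ps) (i + 1) 1 = stcLoop (p :: ps) (i + 2) 0 := by
  simp only [stcLoop, List.drop_one, List.tail_cons, List.drop_zero]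
  rw [show (1 : Nat) = 0 + 1 from rfl, stcFindPct_shift]
  rcases hf : stcFindPct p 0 with _ | j
  · simp only [Option.map_none]
    simp only [List.length_cons, reduceCtorEq, if_false, Nat.zero_ne_add_one, and_false]
    congr 1
    omega
  · simp only [Option.map_some]
    congr 1
    omega

theorem scanOpt_eq_stcLoop :
    ∀ n (cs : List Char), cs.length ≤ n → ∀ i,
      scanOpt cs i = stcLoop (stcSplit cs) i 0 := by
  intro n
  induction n with
  | zero =>
    intro cs h i
    have : cs = [] := List.length_eq_zero_iff.mp (Nat.le_zero.mp h)
    subst this; simp [scanOpt, stcSplit, stcLoop, stcFindPct]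
  | succ n ih =>
    intro cs h i
    match cs with
    | [] => simp [scanOpt, stcSplit, stcLoop, stcFindPct]
    | c :: rest =>
      by_cases hb : c = '\\'
      · subst hb
        rw [show scanOpt ('\\' :: rest) i = scanOpt (rest.drop 1) (i + 2) from by
              simp [scanOpt]]
        rw [stcSplit_bs]
        rw [show stcLoop ([] :: stcSplit rest) i 0 = stcLoop (stcSplit rest) (i + 1) 1 from by
              simp [stcLoop, stcFindPct]]
        match rest with
        | [] =>
          simp [scanOpt, stcSplit, stcLoop, stcFindPct]
        | d :: rest' =>
          by_cases hd : d = '\\'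
          · subst hd
            rw [stcSplit_bs]
            rw [show stcLoop ([] :: stcSplit rest') (i + 1) 1 = stcLoop (stcSplit rest') (i + 2) 0 from by
                  simp [stcLoop, stcFindPct]]
            simpa using ih rest' (by simp at h; omega) (i + 2)
          · obtain ⟨p, ps, hsp⟩ : ∃ p ps, stcSplit rest' = p :: ps := by
              rcases h2 : stcSplit rest' with _ | ⟨p, ps⟩
              · exact absurd h2 (stcSplit_ne_nil rest')
              · exact ⟨p, ps, rfl⟩
            rw [stcSplit_cons_ne d hd rest' p ps hsp, stcLoop_step_esc, ← hsp]
            simpa using ih rest' (by simp at h; omega) (i + 2)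
      · obtain ⟨p, ps, hsp⟩ : ∃ p ps, stcSplit rest = p :: ps := by
          rcases h2 : stcSplit rest with _ | ⟨p, ps⟩
          · exact absurd h2 (stcSplit_ne_nil rest)
          · exact ⟨p, ps, rfl⟩
        rw [stcSplit_cons_ne c hb rest p ps hsp]
        by_cases hp : c = '%'
        · subst hp
          simp [scanOpt, hb, stcLoop, stcFindPct]
        · rw [show scanOpt (c :: rest) i = scanOpt rest (i + 1) from by
                simp [scanOpt, hb, hp]]
          rw [stcLoop_step c hp p ps i, ← hsp]
          exact ih rest (by simp at h; omega) (i + 1)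

-- ===== VERDICT =====
theorem strip_trailing_comment_spec : Claim_equal_strip_trailing_comment := by
  intro line _
  unfold Spec_strip_trailing_comment strip_trailing_comment strip_trailing_comment_alt
  rw [stcGoA_eq_scanOpt line line.toList.length line.toList (le_refl _) 0]
  rw [scanOpt_eq_stcLoop line.toList.length line.toList (le_refl _) 0]
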